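-- pv_equiv track=rewrite | github.com/dahornea/UBB-Projects | FP/a2-913-Hornea-Dorian-Alexandru/src/program.py | same_digits
-- ===== SOURCE A (Python) =====
-- def get_real(x):
--     # we retrieve the real part of the number from the first element of the list
--     return x[0]
--
-- def get_imaginary(x):
--     # we retrieve the imaginary part of the number from the second element of the list
--     return x[1]
--
-- def digit_frequency(n):
--     """
--     :param n: the number whose digits we want to save
--     :return: a list with the number's digits
--     """
--     freq = [0] * 10
--     # Basic algorithm to find the frequency of a number's digits
--     # We get the frequency of the real number's digits
--     i = abs((get_real(n)))
--     while i:
--         d = abs(int(i % 10))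
--         freq[d] = 1
--         i = i // 10
--     # Then the imaginary one
--     j = abs((get_imaginary(n)))
--     while j:
--         d = abs(int(j % 10))
--         freq[d] = 1
--         j = j // 10
--     return freq
--
-- def same_digits(l):
--     '''
--     :param l: the list of complex numbers
--     :return: the longest sequence of numbers where both real and imaginary parts can be written using the same digits
--     '''
--     seq = []
--     seq2 = [l[0]]
--     # We add the first element of l in seq2 to compare it's digits frequency with the next ones.
--     for i in l[1:]:
--         if digit_frequency(i) == digit_frequency(seq2[0]):
--             seq2.append(i)
--         else:
--             if len(seq2) > len(seq):
--                 seq = seq2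
--                 seq2 = []
--             else:
--                 seq2=[]
--             seq2.append(i)
--     if len(seq2) > len(seq):
--         seq = seq2
--     return seq
-- ===== SOURCE B (Python) =====
-- def get_real(x):
--     return x[0]
--
-- def get_imaginary(x):
--     return x[1]
--
-- def digit_frequency(n):
--     freq = [0] * 10
--     i = abs((get_real(n)))
--     while i:
--         d = abs(int(i % 10))
--         freq[d] = 1
--         i = i // 10
--     j = abs((get_imaginary(n)))
--     while j:
--         d = abs(int(j % 10))
--         freq[d] = 1
--         j = j // 10
--     return freq
--
-- def same_digits(l):
--     # Scan right-to-left: carve off the rightmost maximal run of equal digit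
--     # signatures, and replace the best whenever the run is at least as long
--     # (so the leftmost longest run wins in the end).
--     best = []
--     j = len(l)
--     while j > 0:
--         k = digit_frequency(l[j - 1])
--         i = j - 1
--         while i > 0 and digit_frequency(l[i - 1]) == k:
--             i -= 1
--         run = l[i:j]
--         if len(run) >= len(best):
--             best = run
--         j = i
--     return best
-- ===== Notes on version B (the rewrite author's own statement) =====
-- stated objective: alternative
-- what changed: B scans the list right-to-left with an index, carving off the rightmost maximal run of equal digit signatures and replacing the best whenever the new (earlier) run is at least as long, instead of A's left-to-right streaming pass with a best/current pair of growing lists.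
import Mathlib
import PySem

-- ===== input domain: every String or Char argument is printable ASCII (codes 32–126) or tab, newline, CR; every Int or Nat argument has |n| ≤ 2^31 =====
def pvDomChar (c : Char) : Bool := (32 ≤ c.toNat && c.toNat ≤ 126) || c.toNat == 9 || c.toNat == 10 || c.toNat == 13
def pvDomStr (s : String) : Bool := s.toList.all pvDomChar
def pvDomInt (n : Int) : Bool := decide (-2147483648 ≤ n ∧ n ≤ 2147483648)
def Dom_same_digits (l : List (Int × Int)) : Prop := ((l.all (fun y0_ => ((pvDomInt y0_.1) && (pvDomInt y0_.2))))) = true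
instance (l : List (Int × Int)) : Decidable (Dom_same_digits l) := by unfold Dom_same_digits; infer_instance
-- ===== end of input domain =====

-- B scans the list RIGHT-TO-LEFT, carving off the rightmost maximal same-signature run and keeping
-- it when at least as long as the best so far; A streams left-to-right with a best/current pair.
-- Objective: alternative. Pre_ excludes only the empty list, on which A raises IndexError.


-- ===== PORT A =====
def get_real (x : Int × Int) : Int := x.1

def get_imaginary (x : Int × Int) : Int := x.2

-- the 'while i: freq[abs(int(i % 10))] = 1; i = i // 10' loop; the loop variable is |real part| /
-- |imaginary part|, i.e. a nonnegative integer, represented as Nat (Python's // and % agree with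
-- Nat division/mod on nonnegative operands, and abs(int(i % 10)) = i % 10 there)
def digitLoop (i : Nat) (freq : List Int) : List Int :=
  if i ≠ 0 then digitLoop (i / 10) (freq.set (i % 10) 1) else freq
decreasing_by omega

def digit_frequency (n : Int × Int) : List Int :=
  let freq := List.replicate 10 (0 : Int)
  let freq := digitLoop (get_real n).natAbs freq   -- i = abs(get_real(n)); while i: ...
  digitLoop (get_imaginary n).natAbs freq          -- j = abs(get_imaginary(n)); while j: ...

-- one iteration of A's for-loop over l[1:]; state = (seq, seq2); seq2[0] via headD: seq2 is
-- nonempty at the start of every iteration (it is always reset to a one-element list)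
def aStep (s : List (Int × Int) × List (Int × Int)) (i : Int × Int) :
    List (Int × Int) × List (Int × Int) :=
  if digit_frequency i = digit_frequency (s.2.headD (0, 0)) then
    (s.1, s.2 ++ [i])
  else
    if s.2.length > s.1.length then (s.2, [i]) else (s.1, [i])

def same_digits (l : List (Int × Int)) : List (Int × Int) :=
  match l with
  | [] => []   -- Python raises IndexError on l[0] here; excluded by Pre_same_digits
  | x0 :: rest =>   -- seq = []; seq2 = [l[0]]; for i in l[1:]: ...
    let s := rest.foldl aStep ([], [x0])
    if s.2.length > s.1.length then s.2 else s.1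

-- ===== PORT B =====
-- B's inner 'while i > 0 and digit_frequency(l[i-1]) == k: i -= 1'; l[i-1] is always in range,
-- so List.getD is exact here
def runStart (l : List (Int × Int)) (k : List Int) (i : Nat) : Nat :=
  if 0 < i ∧ digit_frequency (l.getD (i - 1) (0, 0)) = k then runStart l k (i - 1) else i
decreasing_by omega

-- termination fact for the outer loop (cited by bOuter's decreasing_by)
theorem runStart_le (l : List (Int × Int)) (k : List Int) : ∀ i, runStart l k i ≤ i := by
  intro i
  induction i using Nat.strong_induction_on with
  | _ i ih =>
    rw [runStart]
    by_cases h : 0 < i ∧ digit_frequency (l.getD (i - 1) (0, 0)) = k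
    · rw [if_pos h]; exact le_trans (ih (i - 1) (by omega)) (by omega)
    · rw [if_neg h]

-- B's outer 'while j > 0' loop: run = l[i:j] (ported as (l.drop i).take (j - i), exact for
-- 0 ≤ i ≤ j ≤ len(l)), best updated when len(run) >= len(best), then j = i
def bOuter (l : List (Int × Int)) (best : List (Int × Int)) (j : Nat) : List (Int × Int) :=
  if _h : 0 < j then
    let k := digit_frequency (l.getD (j - 1) (0, 0))
    let i := runStart l k (j - 1)
    let run := (l.drop i).take (j - i)
    bOuter l (if run.length ≥ best.length then run else best) i
  else best
termination_by j
decreasing_by exact lt_of_le_of_lt (runStart_le l _ (j - 1)) (by omega)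

def same_digits_alt (l : List (Int × Int)) : List (Int × Int) :=
  bOuter l [] l.length

-- ===== PRECONDITION & SPEC =====
-- Pre_ excludes only the empty list, on which A raises IndexError (B returns [] there)
def Pre_same_digits (l : List (Int × Int)) : Prop := l ≠ []
instance (l : List (Int × Int)) : Decidable (Pre_same_digits l) := by unfold Pre_same_digits; infer_instance

def pvWitness_same_digits : (List (Int × Int)) := [(12, 21), (3, 4), (43, 34)]

def Spec_same_digits (l : List (Int × Int)) (out : List (Int × Int)) : Prop := out = same_digits_alt l
instance (l : List (Int × Int)) (out : List (Int × Int)) : Decidable (Spec_same_digits l out) := by unfold Spec_same_digits; infer_instance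

-- ===== CLAIM (what is proved, stated in full; the proofs are below) =====
def Claim_equal_same_digits : Prop := ∀ (l : List (Int × Int)), Dom_same_digits l → Pre_same_digits l → Spec_same_digits l (same_digits l)

-- ===== LEMMAS AND PROOFS =====

-- the list of maximal consecutive runs of `cur ++ rest` sharing a digit signature, given the
-- (nonempty) current run `cur`; common abstraction both ports are reduced to
def groupsFrom (cur : List (Int × Int)) : List (Int × Int) → List (List (Int × Int))
  | [] => [cur]
  | x :: rest =>
    if digit_frequency x = digit_frequency (cur.headD (0, 0)) then groupsFrom (cur ++ [x]) rest
    else cur :: groupsFrom [x] rest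

def groupsOf : List (Int × Int) → List (List (Int × Int))
  | [] => []
  | x :: rest => groupsFrom [x] rest

-- A side: "first strictly-longer run wins" selection, as a left fold
def pick (best : List (Int × Int)) (gs : List (List (Int × Int))) : List (Int × Int) :=
  gs.foldl (fun b g => if g.length > b.length then g else b) best

-- B side: "leftmost longest run" selection, as a right fold with ≥
def stepR (g b : List (Int × Int)) : List (Int × Int) :=
  if g.length ≥ b.length then g else b

def pickR (gs : List (List (Int × Int))) : List (Int × Int) :=
  gs.foldr stepR []

lemma aLoop_eq_pick (rest : List (Int × Int)) :
    ∀ (best cur : List (Int × Int)),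
      (let s := rest.foldl aStep (best, cur);
       if s.2.length > s.1.length then s.2 else s.1) = pick best (groupsFrom cur rest) := by
  induction rest with
  | nil => intro best cur; simp [pick, groupsFrom]
  | cons x rest ih =>
    intro best cur
    simp only [List.foldl_cons, aStep, groupsFrom]
    by_cases h : digit_frequency x = digit_frequency (cur.headD (0, 0))
    · simp only [h, if_true]
      exact ih best (cur ++ [x])
    · rw [if_neg h, if_neg h]
      by_cases hl : cur.length > best.length
      · rw [if_pos hl]
        have := ih cur [x]
        simpa [pick, if_pos hl] using this
      · rw [if_neg hl]
        have := ih best [x]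
        simpa [pick, if_neg hl] using this

lemma groupsFrom_cons_nonempty (rest : List (Int × Int)) :
    ∀ (cur : List (Int × Int)), cur ≠ [] →
      ∃ h t, groupsFrom cur rest = h :: t ∧ h ≠ [] := by
  induction rest with
  | nil => intro cur hc; exact ⟨cur, [], rfl, hc⟩
  | cons x rest ih =>
    intro cur hc
    simp only [groupsFrom]
    by_cases h : digit_frequency x = digit_frequency (cur.headD (0, 0))
    · rw [if_pos h]; exact ih (cur ++ [x]) (by simp)
    · rw [if_neg h]; exact ⟨cur, groupsFrom [x] rest, rfl, hc⟩

-- pick (strict >, left fold) against pickR (≥, right fold): both keep the leftmost longest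
lemma pick_eq_pickR (gs : List (List (Int × Int))) :
    ∀ best, pick best gs = if (pickR gs).length > best.length then pickR gs else best := by
  induction gs with
  | nil => intro best; simp [pick, pickR]
  | cons g gs ih =>
    intro best
    have h1 : pick best (g :: gs) = pick (if g.length > best.length then g else best) gs := rfl
    have h2 : pickR (g :: gs) = stepR g (pickR gs) := rfl
    rw [h1, ih, h2]
    unfold stepR
    split_ifs <;> first | rfl | omega

lemma pickR_pos (g : List (Int × Int)) (gs : List (List (Int × Int))) (hg : 0 < g.length) :
    0 < (pickR (g :: gs)).length := by
  have h2 : pickR (g :: gs) = stepR g (pickR gs) := rfl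
  rw [h2]; unfold stepR; split_ifs <;> omega

lemma mem_getLastD (xs : List (Int × Int)) (d : Int × Int) (h : xs ≠ []) : xs.getLastD d ∈ xs := by
  induction xs with
  | nil => exact absurd rfl h
  | cons a t ih =>
    cases t with
    | nil => simp
    | cons b t' => simpa using List.mem_cons_of_mem a (ih (by simp))

lemma getLastD_append_cons (xs : List (Int × Int)) (y : Int × Int) (ys : List (Int × Int)) :
    ∀ (d : Int × Int), ((xs ++ y :: ys).getLastD d) = ((y :: ys).getLastD d) := by
  induction xs with
  | nil => intro d; rfl
  | cons a t ih =>
    intro d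
    show ((a :: (t ++ y :: ys)).getLastD d) = ((y :: ys).getLastD d)
    rw [List.getLastD_cons, ih a, List.getLastD_cons, List.getLastD_cons]

lemma groupsFrom_all_same (rest : List (Int × Int)) :
    ∀ cur, cur ≠ [] →
      (∀ y ∈ rest, digit_frequency y = digit_frequency (cur.headD (0, 0))) →
      groupsFrom cur rest = [cur ++ rest] := by
  induction rest with
  | nil => intro cur _ _; simp [groupsFrom]
  | cons x rest ih =>
    intro cur hc hall
    simp only [groupsFrom]
    rw [if_pos (hall x (by simp))]
    have hhead : (cur ++ [x]).headD (0, 0) = cur.headD (0, 0) := by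
      cases cur with | nil => exact absurd rfl hc | cons a t => rfl
    rw [ih (cur ++ [x]) (by simp) (by intro y hy; rw [hhead]; exact hall y (by simp [hy]))]
    simp

lemma groupsFrom_append (rest : List (Int × Int)) :
    ∀ (cur g : List (Int × Int)), cur ≠ [] → g ≠ [] →
      (∀ y ∈ cur, digit_frequency y = digit_frequency (cur.headD (0, 0))) →
      (∀ y ∈ g, digit_frequency y = digit_frequency (g.headD (0, 0))) →
      digit_frequency ((cur ++ rest).getLastD (0, 0)) ≠ digit_frequency (g.headD (0, 0)) →
      groupsFrom cur (rest ++ g) = groupsFrom cur rest ++ [g] := by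
  induction rest with
  | nil =>
    intro cur g hc hgne hcur hg hne
    cases g with
    | nil => exact absurd rfl hgne
    | cons gh gt =>
      simp only [List.nil_append, groupsFrom]
      have hlast : digit_frequency (cur.getLastD (0, 0)) = digit_frequency (cur.headD (0, 0)) :=
        hcur _ (mem_getLastD cur (0, 0) hc)
      have hcond : ¬ digit_frequency gh = digit_frequency (cur.headD (0, 0)) := by
        intro he
        apply hne
        rw [List.append_nil, hlast, ← he]
        exact he.symm ▸ rfl
      rw [if_neg hcond]
      rw [groupsFrom_all_same gt [gh] (by simp)
        (by intro y hy; simpa using hg y (by simp [hy]))]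
      rfl
  | cons y rest' ih =>
    intro cur g hc hgne hcur hg hne
    simp only [List.cons_append, groupsFrom]
    by_cases h : digit_frequency y = digit_frequency (cur.headD (0, 0))
    · rw [if_pos h, if_pos h]
      have hhead : (cur ++ [y]).headD (0, 0) = cur.headD (0, 0) := by
        cases cur with | nil => exact absurd rfl hc | cons a t => rfl
      apply ih (cur ++ [y]) g (by simp) hgne
      · intro z hz
        rw [hhead]
        rcases (List.mem_append.mp hz) with hz | hz
        · exact hcur z hz
        · simp at hz; subst hz; exact h
      · exact hg
      · have : cur ++ [y] ++ rest' = cur ++ (y :: rest') := by simp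
        rw [this]; exact hne
    · rw [if_neg h, if_neg h]
      rw [ih [y] g (by simp) hgne (by simp) hg
        (by rw [show ([y] ++ rest' : List (Int × Int)) = y :: rest' from rfl,
               ← getLastD_append_cons cur y rest']; exact hne)]
      rfl

-- runStart's postcondition: at the result i*, either i* = 0 or l[i*-1]'s signature differs from k
lemma runStart_post (l : List (Int × Int)) (k : List Int) : ∀ i,
    runStart l k i = 0 ∨ digit_frequency (l.getD (runStart l k i - 1) (0, 0)) ≠ k := by
  intro i
  induction i using Nat.strong_induction_on with
  | _ i ih =>
    rw [runStart]
    by_cases h : 0 < i ∧ digit_frequency (l.getD (i - 1) (0, 0)) = k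
    · rw [if_pos h]; exact ih (i - 1) (by omega)
    · rw [if_neg h]
      by_cases h0 : i = 0
      · left; exact h0
      · right; intro he; exact h ⟨by omega, he⟩

-- every index between runStart and the start index carries signature k
lemma runStart_sig (l : List (Int × Int)) (k : List Int) : ∀ i,
    digit_frequency (l.getD i (0, 0)) = k →
    ∀ m, runStart l k i ≤ m → m ≤ i → digit_frequency (l.getD m (0, 0)) = k := by
  intro i
  induction i using Nat.strong_induction_on with
  | _ i ih =>
    intro hi m hm1 hm2
    rw [runStart] at hm1
    by_cases h : 0 < i ∧ digit_frequency (l.getD (i - 1) (0, 0)) = k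
    · rw [if_pos h] at hm1
      by_cases hmi : m = i
      · subst hmi; exact hi
      · exact ih (i - 1) (by omega) h.2 m hm1 (by omega)
    · rw [if_neg h] at hm1
      have : m = i := by omega
      subst this; exact hi

lemma take_getLastD : ∀ (l : List (Int × Int)) (i : Nat) (d : Int × Int), 0 < i → i ≤ l.length →
    (l.take i).getLastD d = l.getD (i - 1) d := by
  intro l
  induction l with
  | nil => intro i d h1 h2; simp at h2; omega
  | cons a t ih =>
    intro i d h1 h2
    match i, h1 with
    | 1, _ =>
      cases ht : t.take 0 <;> simp [List.take_succ_cons] at *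
    | (n+2), _ =>
      have h2' : n + 1 ≤ t.length := by simpa using h2
      have := ih (n + 1) a (by omega) h2'
      have hin : n < t.length := by omega
      simp only [List.take_succ_cons]
      cases htt : t.take (n+1) with
      | nil =>
        have hlen := congrArg List.length htt
        rw [List.length_take] at hlen
        simp [Nat.min_eq_zero_iff] at hlen
        rw [hlen] at hin
        simp at hin
      | cons b t' =>
        simp only [List.getLastD_cons, ← htt, this]
        simp [List.getD_eq_getElem?_getD, List.getElem?_eq_getElem hin]

lemma mem_run (l : List (Int × Int)) (i j : Nat) (hij : i ≤ j) (hj : j ≤ l.length) :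
    ∀ y ∈ (l.drop i).take (j - i), ∃ m, i ≤ m ∧ m < j ∧ y = l.getD m (0, 0) := by
  intro y hy
  obtain ⟨t, ht, hyt⟩ := List.mem_iff_getElem.mp hy
  have hlen : ((l.drop i).take (j - i)).length = j - i := by
    simp [List.length_take, List.length_drop]; omega
  rw [hlen] at ht
  have hdl : t < (l.drop i).length := by simp [List.length_drop]; omega
  have hil : i + t < l.length := by simp [List.length_drop] at hdl; omega
  refine ⟨i + t, by omega, by omega, ?_⟩
  rw [← hyt]
  rw [List.getElem_take, List.getElem_drop]
  simp [List.getD_eq_getElem?_getD, List.getElem?_eq_getElem hil]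

-- the outer right-to-left loop equals a right fold of stepR over the runs of l[:j]
lemma bOuter_eq (l : List (Int × Int)) : ∀ j, j ≤ l.length → ∀ best,
    bOuter l best j = (groupsOf (l.take j)).foldr stepR best := by
  intro j
  induction j using Nat.strong_induction_on with
  | _ j ih =>
    intro hj best
    by_cases h0 : 0 < j
    · have hstep : bOuter l best j =
          bOuter l
            (if ((l.drop (runStart l (digit_frequency (l.getD (j - 1) (0, 0))) (j - 1))).take
                  (j - runStart l (digit_frequency (l.getD (j - 1) (0, 0))) (j - 1))).length ≥
                best.length then
              (l.drop (runStart l (digit_frequency (l.getD (j - 1) (0, 0))) (j - 1))).take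
                (j - runStart l (digit_frequency (l.getD (j - 1) (0, 0))) (j - 1))
            else best)
            (runStart l (digit_frequency (l.getD (j - 1) (0, 0))) (j - 1)) := by
        rw [bOuter.eq_def, dif_pos h0]
      obtain ⟨k, hk⟩ : ∃ k, digit_frequency (l.getD (j - 1) (0, 0)) = k := ⟨_, rfl⟩
      rw [hk] at hstep
      obtain ⟨i, hi⟩ : ∃ i, runStart l k (j - 1) = i := ⟨_, rfl⟩
      rw [hi] at hstep
      have hle : i ≤ j - 1 := hi ▸ runStart_le l k (j - 1)
      obtain ⟨run, hr⟩ : ∃ r, (l.drop i).take (j - i) = r := ⟨_, rfl⟩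
      rw [hr] at hstep
      have hrlen : run.length = j - i := by
        rw [← hr]; simp [List.length_take, List.length_drop]; omega
      have hrne : run ≠ [] := by
        intro he; rw [he] at hrlen; simp at hrlen; omega
      have hsig : ∀ y ∈ run, digit_frequency y = k := by
        intro y hy
        rw [← hr] at hy
        obtain ⟨m, hm1, hm2, hym⟩ := mem_run l i j (by omega) hj y hy
        rw [hym]
        exact runStart_sig l k (j - 1) hk m (by rw [hi]; exact hm1) (by omega)
      have hrall : ∀ y ∈ run, digit_frequency y = digit_frequency (run.headD (0, 0)) := by
        intro y hy
        have hh : run.headD (0, 0) ∈ run := by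
          cases hrc : run with
          | nil => exact absurd hrc hrne
          | cons a t => simp
        rw [hsig y hy, hsig _ hh]
      have htake : l.take j = l.take i ++ run := by
        have hji : i + (j - i) = j := by omega
        calc l.take j = l.take (i + (j - i)) := by rw [hji]
          _ = l.take i ++ (l.drop i).take (j - i) := List.take_add
          _ = l.take i ++ run := by rw [hr]
      have hgsplit : groupsOf (l.take j) = groupsOf (l.take i) ++ [run] := by
        by_cases hi0 : i = 0
        · subst hi0
          rw [htake]
          simp only [List.take_zero, List.nil_append, groupsOf]
          cases hrc : run with
          | nil => exact absurd hrc hrne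
          | cons r rs =>
            show groupsFrom [r] rs = groupsOf [] ++ [r :: rs]
            rw [groupsFrom_all_same rs [r] (by simp)
              (by intro y hy
                  have hmem := hrall y (by rw [hrc]; exact List.mem_cons_of_mem r hy)
                  rw [hrc] at hmem
                  exact hmem)]
            rfl
        · have hipos : 0 < i := by omega
          have hil : i ≤ l.length := by omega
          have htne : l.take i ≠ [] := by
            intro he
            have hlen0 : (l.take i).length = 0 := by rw [he]; rfl
            rw [List.length_take] at hlen0
            omega
          cases htk : l.take i with
          | nil => exact absurd htk htne
          | cons t0 ts =>
            rw [htake, htk]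
            show groupsFrom [t0] (ts ++ run) = groupsOf (t0 :: ts) ++ [run]
            have hlastne : digit_frequency (([t0] ++ ts).getLastD (0, 0)) ≠
                digit_frequency (run.headD (0, 0)) := by
              have h1 : ([t0] ++ ts : List (Int × Int)) = l.take i := htk.symm
              rw [h1, take_getLastD l i (0, 0) hipos hil]
              have h2 : digit_frequency (run.headD (0, 0)) = k := by
                apply hsig
                cases hrc : run with
                | nil => exact absurd hrc hrne
                | cons a t => simp
              rw [h2]
              rcases runStart_post l k (j - 1) with hz | hz
              · rw [hi] at hz; exact absurd hz hi0
              · rw [hi] at hz; exact hz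
            exact groupsFrom_append ts [t0] run (by simp) hrne (by simp) hrall hlastne
      rw [hstep, hgsplit, List.foldr_append]
      have hIH := ih i (by omega) (by omega) (stepR run best)
      have hfold : ([run] : List (List (Int × Int))).foldr stepR best = stepR run best := rfl
      rw [hfold]
      exact hIH
    · have hj0 : j = 0 := by omega
      subst hj0
      rw [bOuter.eq_def]
      simp [groupsOf]

-- ===== VERDICT (by name: the statement is the Claim_ definition above) =====
theorem same_digits_spec : Claim_equal_same_digits := by
  intro l _ hpre
  unfold Spec_same_digits
  match l with
  | [] => exact absurd rfl hpre
  | x0 :: rest =>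
    have hA : same_digits (x0 :: rest) = pick [] (groupsFrom [x0] rest) := by
      simpa [same_digits] using aLoop_eq_pick rest [] [x0]
    have hB : same_digits_alt (x0 :: rest) = pickR (groupsOf (x0 :: rest)) := by
      unfold same_digits_alt
      rw [bOuter_eq (x0 :: rest) (x0 :: rest).length (le_refl _) []]
      simp [pickR]
    obtain ⟨h, t, hg, hne⟩ := groupsFrom_cons_nonempty rest [x0] (by simp)
    rw [hA, hB]
    have hgo : groupsOf (x0 :: rest) = groupsFrom [x0] rest := rfl
    have hpos : (pickR (h :: t)).length > ([] : List (Int × Int)).length := by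
      simpa using pickR_pos h t (by simpa [List.length_pos_iff] using hne)
    rw [hgo, hg, pick_eq_pickR, if_pos hpos]
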